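-- pv_equiv track=rewrite | github.com/jgd10/AdventOfCode2024 | day09/src/main.py | shuffle_blocks
-- ===== SOURCE A (Python) =====
-- def shuffle_blocks(disk: list[list[int | None]]) -> tuple[list[list[int]], bool]:
--     empty_block_lengths = []
--     filled_block_lengths = []
--     for i, block in enumerate(disk):
--         check_block = [b is None for b in block]
--         if any(check_block):
--             empty_block_lengths.append((len(block), i))
--         else:
--             filled_block_lengths.append((len(block), i))
--
--     for empty_length, j in empty_block_lengths:
--         for filled_block, i in reversed(filled_block_lengths):
--             if empty_length >= filled_block and i > j:
--                 disk[i][:filled_block], disk[j]  = disk[j][:filled_block], disk[i][:filled_block]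
--                 if empty_length != filled_block:
--                     disk.insert(j+1, [None]*(empty_length-filled_block))
--                 return disk, False
--     return disk, True
-- ===== SOURCE B (Python) =====
-- def shuffle_blocks(disk):
--     n = len(disk)
--     # One right-to-left sweep: maintain a monotone stack of suffix-minimum
--     # filled blocks (length, index); lengths strictly decrease towards the top,
--     # so the rightmost fitting filled block for any empty block is always on
--     # the stack.  Record that partner for every empty block during the sweep.
--     cand = [None] * n
--     recs = []  # (length, index), oldest first: indices and lengths decreasing
--     for k in range(n - 1, -1, -1):
--         block = disk[k]
--         if any(b is None for b in block):
--             T = len(block)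
--             for L, i in recs:
--                 if L <= T:
--                     cand[k] = i
--                     break
--         else:
--             L = len(block)
--             if not recs or L < recs[-1][0]:
--                 recs.append((L, k))
--     # The leftmost empty block with a partner wins; perform the move.
--     for j in range(n):
--         i = cand[j]
--         if i is not None:
--             fl = len(disk[i])
--             old_j = disk[j]
--             ej = len(old_j)
--             disk[j] = disk[i]
--             disk[i] = old_j[:fl]
--             if ej != fl:
--                 disk.insert(j + 1, [None] * (ej - fl))
--             return disk, False
--     return disk, True
-- ===== Notes on version B (the rewrite author's own statement) =====
-- stated objective: alternative
-- what changed: A rescans the whole filled-block list right-to-left for every empty block; B makes one right-to-left sweep that maintains a monotone stack of suffix-minimum filled blocks (on which every rightmost fitting partner must lie) and records each empty block's partner as it passes, then a simple left-to-right pick of the first empty block with a partner performs the move.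
import Mathlib
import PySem

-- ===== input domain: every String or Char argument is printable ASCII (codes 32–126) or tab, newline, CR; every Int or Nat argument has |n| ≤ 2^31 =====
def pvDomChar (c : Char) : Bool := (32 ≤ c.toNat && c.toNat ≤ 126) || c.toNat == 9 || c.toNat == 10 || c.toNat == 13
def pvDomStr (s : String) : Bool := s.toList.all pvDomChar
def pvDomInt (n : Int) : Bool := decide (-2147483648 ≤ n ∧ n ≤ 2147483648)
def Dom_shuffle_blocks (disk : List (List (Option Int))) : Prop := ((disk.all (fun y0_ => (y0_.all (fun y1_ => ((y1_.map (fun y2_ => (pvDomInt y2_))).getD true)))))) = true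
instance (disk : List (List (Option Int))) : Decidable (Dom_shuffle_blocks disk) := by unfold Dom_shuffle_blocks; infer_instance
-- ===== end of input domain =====

-- B replaces A's per-empty-block rescans of the filled-block list by ONE right-to-left sweep that
-- maintains a monotone stack of suffix-minimum filled blocks and records each empty block's
-- rightmost fitting partner, then picks the leftmost empty block with a partner; equivalence is
-- about the RETURN value only (the Python A mutates its argument in place, and B performs the
-- analogous in-place move).

-- ===== PORT A =====
-- for i, block in enumerate(disk): classify into empty/filled (length, index) lists
def pvClassifyA (disk : List (List (Option Int))) : List (Nat × Nat) × List (Nat × Nat) :=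
  (disk.foldl
    (fun (st : (List (Nat × Nat) × List (Nat × Nat)) × Nat) block =>
      let checkBlock := block.map (fun b => b.isNone)
      if checkBlock.any (fun x => x) then
        ((st.1.1 ++ [(block.length, st.2)], st.1.2), st.2 + 1)
      else
        ((st.1.1, st.1.2 ++ [(block.length, st.2)]), st.2 + 1))
    (([], []), 0)).1

-- inner 'for filled_block, i in reversed(filled_block_lengths)' with its early return
def pvInnerA (el j : Nat) : List (Nat × Nat) → Option (Nat × Nat)
  | [] => none
  | (fb, i) :: rest => if fb ≤ el ∧ j < i then some (fb, i) else pvInnerA el j rest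

-- outer (inner scans the reversed filled list) 'for empty_length, j in empty_block_lengths' with its early return
def pvOuterA (filledRev : List (Nat × Nat)) : List (Nat × Nat) → Option ((Nat × Nat) × (Nat × Nat))
  | [] => none
  | (el, j) :: rest =>
    match pvInnerA el j filledRev with
    | some hit => some ((el, j), hit)
    | none => pvOuterA filledRev rest

-- the swap + optional insert; Python's indices i, j are in range, so getD/set are exact here
def pvMoveA (disk : List (List (Option Int))) (el j fb i : Nat) : List (List (Option Int)) :=
  let rhs1 := (disk.getD j []).take fb          -- disk[j][:filled_block]
  let rhs2 := (disk.getD i []).take fb          -- disk[i][:filled_block]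
  let d1 := disk.set i (rhs1 ++ (disk.getD i []).drop fb)   -- disk[i][:filled_block] = rhs1
  let d2 := d1.set j rhs2                                    -- disk[j] = rhs2
  if el ≠ fb then PySem.List.insert d2 ((j + 1 : Nat) : Int) (List.replicate (el - fb) none)
  else d2

def shuffle_blocks (disk : List (List (Option Int))) : List (List (Option Int)) × Bool :=
  let c := pvClassifyA disk
  match pvOuterA c.2.reverse c.1 with
  | some ((el, j), (fb, i)) => (pvMoveA disk el j fb i, false)
  | none => (disk, true)

-- ===== PORT B =====
def pvIsEmpty (block : List (Option Int)) : Bool := block.any (fun b => b.isNone)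

-- 'for L, i in recs: if L <= T: cand[k] = i; break' — first record that fits
def pvRecLookup : List (Nat × Nat) → Nat → Option Nat
  | [], _ => none
  | (L, i) :: rest, T => if L ≤ T then some i else pvRecLookup rest T

-- the (index, block) pairs, the carrier of B's right-to-left sweep
def pvEnumFrom : Nat → List (List (Option Int)) → List (Nat × List (Option Int))
  | _, [] => []
  | c, b :: bs => (c, b) :: pvEnumFrom (c + 1) bs

-- 'for k in range(n-1,-1,-1)': right-to-left sweep as structural recursion (the tail — the part to
-- the RIGHT — is processed first); returns (cand, recs): the per-position partner candidates and
-- the monotone stack of suffix-minimum filled blocks (oldest first, as Python appends)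
def pvPass1 : List (Nat × List (Option Int)) → List (Option Nat) × List (Nat × Nat)
  | [] => ([], [])
  | (k, block) :: rest =>
    let p := pvPass1 rest
    if pvIsEmpty block then
      (pvRecLookup p.2 block.length :: p.1, p.2)
    else
      (none :: p.1,
        if (match p.2.getLast? with | none => true | some q => decide (block.length < q.1)) then
          p.2 ++ [(block.length, k)]
        else p.2)

-- 'for j in range(n): if cand[j] is not None: …' — leftmost empty block with a partner
def pvPick : Nat → List (Option Nat) → Option (Nat × Nat)
  | _, [] => none
  | j, c :: rest => match c with | some i => some (j, i) | none => pvPick (j + 1) rest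

-- B's move: disk[j] = disk[i]; disk[i] = old_j[:fl]; optional filler insert
def pvMoveB (disk : List (List (Option Int))) (j i : Nat) : List (List (Option Int)) :=
  let fl := (disk.getD i []).length
  let oldj := disk.getD j []
  let ej := oldj.length
  let d1 := disk.set j (disk.getD i [])
  let d2 := d1.set i (oldj.take fl)
  if ej ≠ fl then PySem.List.insert d2 ((j + 1 : Nat) : Int) (List.replicate (ej - fl) none)
  else d2

def shuffle_blocks_alt (disk : List (List (Option Int))) : List (List (Option Int)) × Bool :=
  let cand := (pvPass1 (pvEnumFrom 0 disk)).1
  match pvPick 0 cand with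
  | some (j, i) => (pvMoveB disk j i, false)
  | none => (disk, true)

-- ===== PRECONDITION & SPEC =====
def Spec_shuffle_blocks (disk : List (List (Option Int))) (out : List (List (Option Int)) × Bool) : Prop := out = shuffle_blocks_alt disk
instance (disk : List (List (Option Int))) (out : List (List (Option Int)) × Bool) : Decidable (Spec_shuffle_blocks disk out) := by unfold Spec_shuffle_blocks; infer_instance

-- ===== CLAIM (what is proved, stated in full; the proofs are below) =====
def Claim_equal_shuffle_blocks : Prop := ∀ (disk : List (List (Option Int))), Dom_shuffle_blocks disk → Spec_shuffle_blocks disk (shuffle_blocks disk)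

-- ===== LEMMAS AND PROOFS =====

-- abbreviations for "the block / emptiness / length at index k of the ORIGINAL disk"
def pvBlk (d : List (List (Option Int))) (k : Nat) : List (Option Int) := d.getD k []
def pvEmp (d : List (List (Option Int))) (k : Nat) : Bool := pvIsEmpty (pvBlk d k)
def pvLen (d : List (List (Option Int))) (k : Nat) : Nat := (pvBlk d k).length

-- the reference search both ports are reduced to
def pvSpecI (d : List (List (Option Int))) (j : Nat) : Option Nat :=
  (List.range d.length).reverse.find?
    (fun i => decide (j < i) && (!pvEmp d i && decide (pvLen d i ≤ pvLen d j)))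

def pvSpecJ (d : List (List (Option Int))) : Option Nat :=
  (List.range d.length).find? (fun j => pvEmp d j && (pvSpecI d j).isSome)

-- reference forms of the two programs
def pvRefA (d : List (List (Option Int))) : List (List (Option Int)) × Bool :=
  match pvSpecJ d with
  | none => (d, true)
  | some j =>
    match pvSpecI d j with
    | some i => (pvMoveA d (pvLen d j) j (pvLen d i) i, false)
    | none => (d, true)

def pvRefB (d : List (List (Option Int))) : List (List (Option Int)) × Bool :=
  match pvSpecJ d with
  | none => (d, true)
  | some j =>
    match pvSpecI d j with
    | some i => (pvMoveB d j i, false)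
    | none => (d, true)

-- generic list facts not found in the library
theorem pv_find?_filter {α : Type} (l : List α) (p q : α → Bool) :
    (l.filter p).find? q = l.find? (fun x => p x && q x) := by
  induction l with
  | nil => rfl
  | cons x xs ih =>
    by_cases hp : p x = true
    · by_cases hq : q x = true
      · simp [List.find?, hp, hq]
      · simp only [Bool.not_eq_true] at hq
        simp [List.find?, hp, hq, ih]
    · simp only [Bool.not_eq_true] at hp
      simp [List.find?, hp, ih]

theorem pv_find?_congr_mem {α : Type} (l : List α) (p q : α → Bool)
    (h : ∀ x ∈ l, p x = q x) : l.find? p = l.find? q := by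
  induction l with
  | nil => rfl
  | cons x xs ih =>
    have hx := h x (by simp)
    simp only [List.find?, hx]
    split
    · rfl
    · exact ih (fun y hy => h y (by simp [hy]))

theorem pv_filterMap_if {α β : Type} (l : List α) (p : α → Bool) (f : α → β) :
    l.filterMap (fun x => if p x then some (f x) else none) = (l.filter p).map f := by
  induction l with
  | nil => rfl
  | cons x xs ih =>
    by_cases hp : p x = true
    · simp [hp, ih]
    · simp only [Bool.not_eq_true] at hp
      simp [hp, ih]

theorem pv_find?_app {α : Type} (l1 l2 : List α) (p : α → Bool) :
    (l1 ++ l2).find? p = match l1.find? p with | some x => some x | none => l2.find? p := by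
  induction l1 with
  | nil => rfl
  | cons x xs ih =>
    by_cases hp : p x = true
    · simp [List.find?, hp]
    · simp only [Bool.not_eq_true] at hp
      simp [List.find?, hp, ih]

-- ---- A side ----
theorem pvEnumFrom_eq (ds : List (List (Option Int))) :
    ∀ c, pvEnumFrom c ds = (List.range ds.length).map (fun k => (c + k, ds.getD k [])) := by
  induction ds with
  | nil => intro c; rfl
  | cons b bs ih =>
    intro c
    simp only [pvEnumFrom, ih (c + 1), List.length_cons, List.range_succ_eq_map,
      List.map_cons, List.map_map, Function.comp_def, Nat.add_zero, List.getD_cons_zero,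
      List.getD_cons_succ]
    refine congrArg (List.cons (c, b)) (List.map_congr_left (fun k _ => ?_))
    have : c + 1 + k = c + k.succ := by omega
    rw [this]

theorem pvClassifyA_go (ds : List (List (Option Int))) :
    ∀ (a1 a2 : List (Nat × Nat)) (c : Nat),
    ds.foldl
      (fun (st : (List (Nat × Nat) × List (Nat × Nat)) × Nat) block =>
        let checkBlock := block.map (fun b => b.isNone)
        if checkBlock.any (fun x => x) then
          ((st.1.1 ++ [(block.length, st.2)], st.1.2), st.2 + 1)
        else
          ((st.1.1, st.1.2 ++ [(block.length, st.2)]), st.2 + 1))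
      ((a1, a2), c)
    = ((a1 ++ (pvEnumFrom c ds).filterMap
          (fun p => if pvIsEmpty p.2 then some (p.2.length, p.1) else none),
        a2 ++ (pvEnumFrom c ds).filterMap
          (fun p => if pvIsEmpty p.2 then none else some (p.2.length, p.1))),
       c + ds.length) := by
  induction ds with
  | nil => intro a1 a2 c; simp [pvEnumFrom]
  | cons b bs ih =>
    intro a1 a2 c
    rw [List.foldl_cons]
    have hany : (b.map (fun x => x.isNone)).any (fun x => x) = pvIsEmpty b := by
      simp only [pvIsEmpty, List.any_map]
      rfl
    by_cases hb : pvIsEmpty b = true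
    · simp only [hany, hb]
      rw [ih]
      simp [pvEnumFrom, hb, Nat.add_assoc, Nat.add_comm 1 bs.length]
    · simp only [Bool.not_eq_true] at hb
      simp only [hany, hb]
      rw [if_neg (by simp), ih]
      simp [pvEnumFrom, hb, Nat.add_assoc, Nat.add_comm 1 bs.length]

theorem pvClassifyA_eq (d : List (List (Option Int))) :
    pvClassifyA d =
      (((List.range d.length).filter (fun k => pvEmp d k)).map (fun k => (pvLen d k, k)),
       ((List.range d.length).filter (fun k => !pvEmp d k)).map (fun k => (pvLen d k, k))) := by
  unfold pvClassifyA
  rw [pvClassifyA_go d [] [] 0, pvEnumFrom_eq]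
  simp only [List.nil_append, List.filterMap_map, Function.comp_def, Nat.zero_add]
  rw [← pv_filterMap_if (List.range d.length) (fun k => pvEmp d k) (fun k => (pvLen d k, k)),
      ← pv_filterMap_if (List.range d.length) (fun k => !pvEmp d k) (fun k => (pvLen d k, k))]
  refine congrArg₂ Prod.mk rfl ?_
  refine List.filterMap_congr (fun k _ => ?_)
  by_cases h : pvIsEmpty (d[k]?.getD []) = true <;> simp [h, pvEmp, pvBlk, pvLen, List.getD_eq_getElem?_getD]

theorem pvInnerA_eq_find? (el j : Nat) (l : List (Nat × Nat)) :
    pvInnerA el j l = l.find? (fun p => decide (p.1 ≤ el) && decide (j < p.2)) := by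
  induction l with
  | nil => rfl
  | cons p rest ih =>
    obtain ⟨fb, i⟩ := p
    by_cases h : fb ≤ el ∧ j < i
    · simp [pvInnerA, List.find?, h.1, h.2]
    · have hn : ¬(fb ≤ el ∧ j < i) := h
      rw [pvInnerA, if_neg hn, ih]
      simp only [List.find?]
      have hb : (decide (fb ≤ el) && decide (j < i)) = false := by
        rcases Decidable.not_and_iff_not_or_not.mp hn with h1 | h1 <;> simp [h1]
      rw [hb]

theorem pvInnerA_spec (d : List (List (Option Int))) (j : Nat) :
    pvInnerA (pvLen d j) j
        ((((List.range d.length).filter (fun k => !pvEmp d k)).map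
            (fun k => (pvLen d k, k))).reverse)
      = (pvSpecI d j).map (fun i => (pvLen d i, i)) := by
  rw [pvInnerA_eq_find?]
  have h1 : (((List.range d.length).filter (fun k => !pvEmp d k)).map
        (fun k => (pvLen d k, k))).reverse
      = ((List.range d.length).reverse.filter (fun k => !pvEmp d k)).map
          (fun k => (pvLen d k, k)) := by
    simp [List.map_reverse, List.filter_reverse]
  rw [h1, List.find?_map, pv_find?_filter]
  unfold pvSpecI
  refine congrArg (Option.map _) (pv_find?_congr_mem _ _ _ ?_)
  intro k _
  simp only [Function.comp]
  cases h1 : pvEmp d k <;> cases h2 : decide (j < k) <;>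
    cases h3 : decide (pvLen d k ≤ pvLen d j) <;> simp_all

theorem pvOuterA_eq (d : List (List (Option Int))) (Fr : List (Nat × Nat)) (js : List Nat) :
    pvOuterA Fr (js.map (fun j => (pvLen d j, j))) =
      match js.find? (fun j => (pvInnerA (pvLen d j) j Fr).isSome) with
      | none => none
      | some j =>
        match pvInnerA (pvLen d j) j Fr with
        | some hit => some ((pvLen d j, j), hit)
        | none => none := by
  induction js with
  | nil => rfl
  | cons j js ih =>
    simp only [List.map_cons, pvOuterA, List.find?]
    cases h : pvInnerA (pvLen d j) j Fr with
    | some hit => simp [h]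
    | none => simp [ih]

theorem pvA_char (d : List (List (Option Int))) : shuffle_blocks d = pvRefA d := by
  unfold shuffle_blocks pvRefA
  rw [pvClassifyA_eq]
  simp only
  rw [pvOuterA_eq]
  unfold pvSpecJ
  rw [pv_find?_filter]
  have hpred : ∀ k ∈ List.range d.length,
      (pvEmp d k &&
        (pvInnerA (pvLen d k) k
          ((((List.range d.length).filter (fun k => !pvEmp d k)).map
            (fun k => (pvLen d k, k))).reverse)).isSome)
      = (pvEmp d k && (pvSpecI d k).isSome) := by
    intro k _
    rw [pvInnerA_spec]
    simp
  rw [pv_find?_congr_mem _ _ _ hpred]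
  cases hj : (List.range d.length).find? (fun j => pvEmp d j && (pvSpecI d j).isSome) with
  | none => rfl
  | some j =>
    simp only
    rw [pvInnerA_spec]
    cases hi : pvSpecI d j with
    | none =>
      have := List.find?_some hj
      simp [hi] at this
    | some i => simp

-- ---- B side ----
-- rightmost filled block of the enumerated suffix with length ≤ T
def pvRM (ds : List (Nat × List (Option Int))) (T : Nat) : Option Nat :=
  (ds.reverse.find? (fun p => !pvIsEmpty p.2 && decide (p.2.length ≤ T))).map Prod.fst

theorem pvRecLookup_app (r1 r2 : List (Nat × Nat)) (T : Nat) :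
    pvRecLookup (r1 ++ r2) T =
      match pvRecLookup r1 T with | some i => some i | none => pvRecLookup r2 T := by
  induction r1 with
  | nil => rfl
  | cons q rest ih =>
    obtain ⟨L, i⟩ := q
    by_cases h : L ≤ T
    · simp [pvRecLookup, h]
    · simp [pvRecLookup, h, ih]

theorem pvRM_mono_none (ds : List (Nat × List (Option Int))) (T T' : Nat) (hT : T' ≤ T)
    (h : pvRM ds T = none) : pvRM ds T' = none := by
  unfold pvRM at *
  rw [Option.map_eq_none_iff, List.find?_eq_none] at *
  intro p hp
  have := h p hp
  cases he : pvIsEmpty p.2 <;> simp [he] at this ⊢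
  omega

theorem pvRecLookup_some_of_mem (recs : List (Nat × Nat)) (T : Nat) (q : Nat × Nat)
    (hm : q ∈ recs) (hL : q.1 ≤ T) : pvRecLookup recs T ≠ none := by
  induction recs with
  | nil => simp at hm
  | cons r rest ih =>
    obtain ⟨L, i⟩ := r
    by_cases h : L ≤ T
    · simp [pvRecLookup, h]
    · rcases List.mem_cons.mp hm with h1 | h1
      · rw [h1] at hL; exact absurd hL h
      · simp only [pvRecLookup, if_neg h]
        exact ih h1

-- the stack after sweeping a suffix answers every "rightmost fit" query about that suffix
theorem pvStack_lookup (ds : List (Nat × List (Option Int))) :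
    ∀ T, pvRecLookup (pvPass1 ds).2 T = pvRM ds T := by
  induction ds with
  | nil => intro T; rfl
  | cons p rest ih =>
    intro T
    obtain ⟨k, b⟩ := p
    have hrev : ((k, b) :: rest).reverse = rest.reverse ++ [(k, b)] := by simp
    by_cases he : pvIsEmpty b = true
    · simp only [pvPass1, he, if_pos]
      rw [ih T]
      unfold pvRM
      rw [hrev, pv_find?_app]
      cases h : rest.reverse.find? (fun p => !pvIsEmpty p.2 && decide (p.2.length ≤ T)) with
      | some x => simp
      | none => simp [List.find?, he]
    · simp only [Bool.not_eq_true] at he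
      simp only [pvPass1, he, Bool.false_eq_true, if_neg (by simp : ¬False)]
      by_cases hpush : (match (pvPass1 rest).2.getLast? with
          | none => true | some q => decide (b.length < q.1)) = true
      · rw [if_pos hpush, pvRecLookup_app]
        unfold pvRM
        rw [hrev, pv_find?_app]
        rw [show (pvRecLookup (pvPass1 rest).2 T) = pvRM rest T from ih T]
        cases h : rest.reverse.find? (fun p => !pvIsEmpty p.2 && decide (p.2.length ≤ T)) with
        | some x => simp [pvRM, h]
        | none =>
          have hnone : pvRM rest T = none := by simp [pvRM, h]
          rw [hnone]
          by_cases hb : b.length ≤ T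
          · simp [pvRecLookup, hb, List.find?, he]
          · simp [pvRecLookup, hb, List.find?, he]
      · rw [if_neg (by simpa using hpush)]
        rw [ih T]
        -- stack nonempty with last length L0 ≤ b.length; so pvRM rest b.length is some
        obtain ⟨q, hq⟩ : ∃ q, (pvPass1 rest).2.getLast? = some q := by
          cases hq : (pvPass1 rest).2.getLast? with
          | none => rw [hq] at hpush; simp at hpush
          | some q => exact ⟨q, rfl⟩
        have hL0 : q.1 ≤ b.length := by
          rw [hq] at hpush; simpa using hpush
        have hmemq : q ∈ (pvPass1 rest).2 := List.mem_of_getLast? hq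
        have hsome : pvRM rest b.length ≠ none := by
          rw [← ih b.length]
          exact pvRecLookup_some_of_mem _ _ _ hmemq hL0
        unfold pvRM
        rw [hrev, pv_find?_app]
        cases h : rest.reverse.find? (fun p => !pvIsEmpty p.2 && decide (p.2.length ≤ T)) with
        | some x => simp
        | none =>
          have hnoneT : pvRM rest T = none := by simp [pvRM, h]
          have hb : ¬ b.length ≤ T := by
            intro hbT
            exact hsome (pvRM_mono_none rest T b.length hbT hnoneT)
          simp [List.find?, he, hb]

theorem pvPass1_cand_len (ds : List (Nat × List (Option Int))) :
    (pvPass1 ds).1.length = ds.length := by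
  induction ds with
  | nil => rfl
  | cons p rest ih =>
    obtain ⟨k, b⟩ := p
    by_cases he : pvIsEmpty b = true <;> simp [pvPass1, he, ih]

-- entry j of cand = rightmost-fit query over the strict right suffix (for empty blocks)
theorem pvPass1_cand_getD (ds : List (List (Option Int))) :
    ∀ c j, j < ds.length →
      ((pvPass1 (pvEnumFrom c ds)).1).getD j none
        = if pvIsEmpty (ds.getD j []) then
            pvRM (pvEnumFrom (c + j + 1) (ds.drop (j + 1))) (ds.getD j []).length
          else none := by
  induction ds with
  | nil => intro c j hj; simp at hj
  | cons b rest ih =>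
    intro c j hj
    cases j with
    | zero =>
      simp only [pvEnumFrom, List.getD_cons_zero, List.drop_succ_cons, List.drop_zero]
      by_cases he : pvIsEmpty b = true
      · simp only [pvPass1, he, if_pos, List.getD_cons_zero]
        rw [pvStack_lookup]
      · simp only [Bool.not_eq_true] at he
        simp [pvPass1, he]
    | succ j =>
      have hj' : j < rest.length := by simpa using hj
      have htail : ((pvPass1 (pvEnumFrom c (b :: rest))).1).getD (j + 1) none
          = ((pvPass1 (pvEnumFrom (c + 1) rest)).1).getD j none := by
        by_cases he : pvIsEmpty b = true <;> simp [pvEnumFrom, pvPass1, he]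
      rw [htail, ih (c + 1) j hj']
      have : c + 1 + j + 1 = c + (j + 1) + 1 := by omega
      simp [this]

theorem pv_getD_drop (d : List (List (Option Int))) (n t : Nat) :
    (d.drop n).getD t [] = d.getD (n + t) [] := by
  simp [List.getD_eq_getElem?_getD, List.getElem?_drop]

-- the rightmost-fit query over the right suffix IS pvSpecI
theorem pvRM_specI (d : List (List (Option Int))) (j : Nat) :
    pvRM (pvEnumFrom (j + 1) (d.drop (j + 1))) (pvLen d j) = pvSpecI d j := by
  by_cases hj : j + 1 ≤ d.length
  · have hm : (d.drop (j + 1)).length = d.length - (j + 1) := by simp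
    set m := d.length - (j + 1) with hmdef
    have hlen : d.length = (j + 1) + m := by omega
    rw [pvEnumFrom_eq, hm]
    have hmap : (List.range m).map (fun t => ((j + 1) + t, (d.drop (j + 1)).getD t []))
        = (List.range m).map (fun t => ((j + 1) + t, pvBlk d ((j + 1) + t))) := by
      refine List.map_congr_left (fun t _ => ?_)
      rw [pv_getD_drop]; rfl
    rw [hmap]
    unfold pvRM pvSpecI
    rw [hlen, List.range_add, List.reverse_append, pv_find?_app]
    have h2 : (List.range (j + 1)).reverse.find?
        (fun i => decide (j < i) && (!pvEmp d i && decide (pvLen d i ≤ pvLen d j))) = none := by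
      rw [List.find?_eq_none]
      intro i hi
      have : i < j + 1 := List.mem_range.mp (List.mem_reverse.mp hi)
      have hni : ¬ j < i := by omega
      simp [hni]
    rw [← List.map_reverse, ← List.map_reverse, List.find?_map, List.find?_map, Option.map_map]
    have hpred : ((fun p => !pvIsEmpty p.2 && decide (p.2.length ≤ pvLen d j)) ∘
          (fun t => ((j + 1) + t, pvBlk d ((j + 1) + t))))
        = ((fun i => decide (j < i) && (!pvEmp d i && decide (pvLen d i ≤ pvLen d j))) ∘
          (fun t => (j + 1) + t)) := by
      funext t
      have hjt : decide (j < (j + 1) + t) = true := by simp; omega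
      simp only [Function.comp, pvEmp, pvLen, hjt, Bool.true_and]
      rfl
    rw [hpred]
    cases hf : (List.range m).reverse.find?
        ((fun i => decide (j < i) && (!pvEmp d i && decide (pvLen d i ≤ pvLen d j))) ∘
          (fun t => (j + 1) + t)) with
    | none => simp [h2]
    | some t => simp [Function.comp]
  · have h1 : d.drop (j + 1) = [] := List.drop_eq_nil_of_le (by omega)
    have h2 : pvSpecI d j = none := by
      unfold pvSpecI
      rw [List.find?_eq_none]
      intro i hi
      have : i < d.length := List.mem_range.mp (List.mem_reverse.mp hi)
      have : ¬ j < i := by omega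
      simp [this]
    rw [h1, h2]; rfl

-- pvPick over a mapped range'
theorem pvPick_range' (F : Nat → Option Nat) :
    ∀ (n c : Nat), pvPick c ((List.range' c n).map F)
      = match (List.range' c n).find? (fun j => (F j).isSome) with
        | none => none
        | some j => (F j).map (fun i => (j, i)) := by
  intro n
  induction n with
  | zero => intro c; rfl
  | succ n ih =>
    intro c
    rw [List.range'_succ]
    simp only [List.map_cons, List.find?]
    cases hFc : F c with
    | some i => simp [pvPick, hFc]
    | none => simp [pvPick, ih (c + 1)]

theorem pvB_char (d : List (List (Option Int))) : shuffle_blocks_alt d = pvRefB d := by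
  have hcand : (pvPass1 (pvEnumFrom 0 d)).1
      = (List.range d.length).map (fun j => if pvEmp d j then pvSpecI d j else none) := by
    apply List.ext_getElem
    · rw [pvPass1_cand_len]
      simp [pvEnumFrom_eq]
    · intro k h1 h2
      have hk : k < d.length := by simpa using h2
      have hgd : (pvPass1 (pvEnumFrom 0 d)).1[k] =
          ((pvPass1 (pvEnumFrom 0 d)).1).getD k none := by
        rw [List.getD_eq_getElem _ _ h1]
      rw [hgd, pvPass1_cand_getD d 0 k hk]
      rw [show (0 : Nat) + k + 1 = k + 1 by omega]
      have hrm := pvRM_specI d k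
      unfold pvLen pvBlk at hrm
      rw [hrm]
      simp [pvEmp, pvBlk, hk]
  have key : shuffle_blocks_alt d =
      match pvPick 0 ((pvPass1 (pvEnumFrom 0 d)).1) with
      | some (j, i) => (pvMoveB d j i, false)
      | none => (d, true) := rfl
  unfold pvRefB
  rw [key, hcand, show List.range d.length = List.range' 0 d.length by rw [List.range_eq_range'],
    pvPick_range' (fun j => if pvEmp d j then pvSpecI d j else none) d.length 0]
  have hpred : ∀ j ∈ List.range' 0 d.length,
      ((if pvEmp d j then pvSpecI d j else none).isSome)
        = (pvEmp d j && (pvSpecI d j).isSome) := by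
    intro j _
    by_cases he : pvEmp d j = true <;> simp [he]
  rw [pv_find?_congr_mem _ _ _ hpred]
  unfold pvSpecJ
  rw [show List.range d.length = List.range' 0 d.length by rw [List.range_eq_range']]
  cases hj : (List.range' 0 d.length).find? (fun j => pvEmp d j && (pvSpecI d j).isSome) with
  | none => rfl
  | some j =>
    have := List.find?_some hj
    have hje : pvEmp d j = true := (Bool.and_eq_true_iff.mp this).1
    simp only [hje, if_pos]
    cases hi : pvSpecI d j with
    | none =>
      have := (Bool.and_eq_true_iff.mp this).2
      rw [hi] at this; simp at this
    | some i => simp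

-- ---- the two moves agree ----
theorem pvMove_eq (d : List (List (Option Int))) (j i : Nat) (hij : j < i) :
    pvMoveA d (pvLen d j) j (pvLen d i) i = pvMoveB d j i := by
  have hne : i ≠ j := by omega
  simp only [pvMoveA, pvMoveB, pvLen, pvBlk]
  rw [List.drop_length, List.append_nil, List.take_length]
  rw [List.set_comm _ _ hne]

theorem pvRef_eq (d : List (List (Option Int))) : pvRefA d = pvRefB d := by
  unfold pvRefA pvRefB
  cases hj : pvSpecJ d with
  | none => rfl
  | some j =>
    simp only
    cases hi : pvSpecI d j with
    | none => rfl
    | some i =>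
      have hpred := List.find?_some (by unfold pvSpecI at hi; exact hi)
      simp only [Bool.and_eq_true, decide_eq_true_eq] at hpred
      have hji : j < i := hpred.1
      simp only
      rw [pvMove_eq d j i hji]

-- ===== VERDICT (by name: the statement is the Claim_ definition above) =====
theorem shuffle_blocks_spec : Claim_equal_shuffle_blocks := by
  intro disk _
  show shuffle_blocks disk = shuffle_blocks_alt disk
  rw [pvA_char, pvB_char, pvRef_eq]
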